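-- pv_equiv track=rewrite | github.com/LloydLore/AutoGT | src/autogt/io/excel_parser.py | _parse_interfaces
-- ===== SOURCE A (Python) =====
-- from typing import Dict, List, Any, Optional, Tuple
--
-- def _parse_interfaces(interfaces_str: str) -> List[str]:
--     """Parse interfaces string into list of interface names."""
--     if not interfaces_str:
--         return []
--
--     # Split by common separators
--     separators = [',', ';', '|', '\n']
--     interfaces = [interfaces_str]
--
--     for sep in separators:
--         new_interfaces = []
--         for interface in interfaces:
--             new_interfaces.extend([i.strip() for i in interface.split(sep)])
--         interfaces = new_interfaces
--
--     # Filter out empty strings and normalize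
--     return [i.upper() for i in interfaces if i and i.strip()]
-- ===== SOURCE B (Python) =====
-- from typing import List
--
-- def _parse_interfaces(interfaces_str: str) -> List[str]:
--     """Parse interfaces string into list of interface names (single pass)."""
--     out = []
--     cur = []
--     for ch in interfaces_str + ',':
--         if ch in ',;|\n':
--             tok = ''.join(cur).strip()
--             if tok:
--                 out.append(tok.upper())
--             cur = []
--         else:
--             cur.append(ch)
--     return out
-- ===== Notes on version B (the rewrite author's own statement) =====
-- stated objective: simpler
-- what changed: A builds four successive intermediate lists, one split-and-strip pass per separator, then filters and uppercases; B makes a single left-to-right scan over the string, accumulating the current token and flushing it (strip, drop if empty, uppercase) at every separator.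
import Mathlib
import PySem

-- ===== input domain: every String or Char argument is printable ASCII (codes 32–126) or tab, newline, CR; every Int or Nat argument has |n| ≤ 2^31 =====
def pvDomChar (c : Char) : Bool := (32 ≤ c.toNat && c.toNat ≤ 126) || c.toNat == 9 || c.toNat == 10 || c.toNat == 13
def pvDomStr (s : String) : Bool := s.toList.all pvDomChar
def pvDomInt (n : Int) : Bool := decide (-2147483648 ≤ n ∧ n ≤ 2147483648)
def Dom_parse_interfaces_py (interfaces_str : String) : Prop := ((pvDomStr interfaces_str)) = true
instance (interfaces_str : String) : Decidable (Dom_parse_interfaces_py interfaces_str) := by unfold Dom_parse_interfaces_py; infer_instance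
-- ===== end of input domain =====

-- B replaces A's four successive split-then-strip passes by a single left-to-right scan that
-- flushes the accumulated token at each separator (objective: simpler one-pass algorithm).

-- the four separators of the Python source
def pvSeps : List Char := [',', ';', '|', '\n']

-- ===== PORT A =====
def parse_interfaces_py (interfaces_str : String) : List String :=
  if interfaces_str.toList = [] then []
  else
    let interfaces :=
      pvSeps.foldl
        (fun interfaces sep =>
          interfaces.foldl
            (fun new_interfaces interface =>
              new_interfaces ++ (PySem.Chars.splitOn interface [sep]).map PySem.Chars.strip)
            [])
        [interfaces_str.toList]
    (interfaces.filter
        (fun i => !i.isEmpty && !(PySem.Chars.strip i).isEmpty)).map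
      (fun i => String.ofList (PySem.Chars.upper i))

-- ===== PORT B =====
-- one step of B's scan: flush the current token on a separator, else extend it
def pvStepB (st : List String × List Char) (ch : Char) : List String × List Char :=
  if ch ∈ pvSeps then
    let tok := PySem.Chars.strip st.2
    (if tok = [] then st.1 else st.1 ++ [String.ofList (PySem.Chars.upper tok)], [])
  else (st.1, st.2 ++ [ch])

def parse_interfaces_py_alt (interfaces_str : String) : List String :=
  ((interfaces_str.toList ++ [',']).foldl pvStepB ([], [])).1

-- ===== PRECONDITION & SPEC =====
def Spec_parse_interfaces_py (interfaces_str : String) (out : List String) : Prop := out = parse_interfaces_py_alt interfaces_str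
instance (interfaces_str : String) (out : List String) : Decidable (Spec_parse_interfaces_py interfaces_str out) := by unfold Spec_parse_interfaces_py; infer_instance

-- ===== CLAIM (what is proved, stated in full; the proofs are below) =====
def Claim_equal_parse_interfaces_py : Prop := ∀ (interfaces_str : String), Dom_parse_interfaces_py interfaces_str → Spec_parse_interfaces_py interfaces_str (parse_interfaces_py interfaces_str)

-- ===== LEMMAS AND PROOFS =====

def pvTok (S : List Char) : List Char → List (List Char)
  | [] => [[]]
  | c :: cs => if c ∈ S then [] :: pvTok S cs else (pvTok S cs).modifyHead (c :: ·)

theorem pvTok_ne_nil (S : List Char) (cs : List Char) : pvTok S cs ≠ [] := by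
  induction cs with
  | nil => simp [pvTok]
  | cons c cs ih =>
    simp only [pvTok]
    split
    · simp
    · cases h : pvTok S cs with
      | nil => exact absurd h ih
      | cons a l => simp

theorem pvGo_spec (c : Char) (l : List Char) :
    ∀ (fuel : Nat) (cur : List Char) (acc : List (List Char)), l.length < fuel →
    PySem.Chars.splitOn.go [c] fuel l cur.reverse acc =
      acc.reverse ++ (pvTok [c] l).modifyHead (cur ++ ·) := by
  induction l with
  | nil =>
    intro fuel cur acc hf
    match fuel, hf with
    | fuel+1, _ =>
      rw [PySem.Chars.splitOn.go.eq_def]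
      simp [pvTok]
  | cons d rest ih =>
    intro fuel cur acc hf
    match fuel, hf with
    | fuel+1, hf =>
      rw [PySem.Chars.splitOn.go.eq_def]
      simp only [List.isPrefixOf, Bool.and_true]
      by_cases hdc : c = d
      · subst hdc
        simp only [beq_self_eq_true, if_pos, List.length_cons] at hf ⊢
        have h2 := ih fuel [] (cur :: acc) (by omega)
        simp only [List.reverse_nil] at h2
        simp only [List.length_nil, List.reverse_reverse, Nat.zero_add, List.drop_succ_cons,
          List.drop_zero, h2]
        cases htok : pvTok [c] rest with
        | nil => exact absurd htok (pvTok_ne_nil [c] rest)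
        | cons a t => simp [pvTok, htok]
      · have hbeq : (c == d) = false := by simp [hdc]
        simp only [hbeq, Bool.false_eq_true, if_false, List.length_cons] at hf ⊢
        have h2 := ih fuel (cur ++ [d]) acc (by omega)
        simp only [List.reverse_append, List.reverse_cons, List.reverse_nil, List.nil_append,
          List.singleton_append] at h2
        rw [h2]
        have hne := pvTok_ne_nil [c] rest
        cases htok : pvTok [c] rest with
        | nil => exact absurd htok hne
        | cons a t =>
          simp [pvTok, (Ne.symm hdc : d ≠ c), htok, List.append_assoc]

theorem pvSplitOn_eq_tok (c : Char) (cs : List Char) :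
    PySem.Chars.splitOn cs [c] = pvTok [c] cs := by
  have h := pvGo_spec c cs (cs.length + 1) [] [] (by omega)
  simp only [List.reverse_nil, List.nil_append] at h
  rw [PySem.Chars.splitOn, h]
  cases htok : pvTok [c] cs with
  | nil => exact absurd htok (pvTok_ne_nil [c] cs)
  | cons a t => simp

theorem pvTok_cons (c : Char) (S : List Char) (cs : List Char) :
    pvTok (c :: S) cs = (pvTok [c] cs).flatMap (pvTok S) := by
  induction cs with
  | nil => simp [pvTok]
  | cons d rest ih =>
    by_cases hdc : d = c
    · subst hdc
      simp [pvTok, ih]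
    · by_cases hdS : d ∈ S
      · cases htok : pvTok [c] rest with
        | nil => exact absurd htok (pvTok_ne_nil [c] rest)
        | cons a t =>
          simp only [pvTok, List.mem_cons, hdc, hdS, or_true, if_pos, if_neg,
            List.mem_singleton, htok, List.modifyHead_cons, List.flatMap_cons] at ih ⊢
          simp [pvTok, hdS, ih, htok]
      · cases htok : pvTok [c] rest with
        | nil => exact absurd htok (pvTok_ne_nil [c] rest)
        | cons a t =>
          have hmem : d ∈ c :: S ↔ False := by simp [hdc, hdS]
          simp only [pvTok, List.mem_cons, hmem, iff_false, hdc, hdS,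
            List.mem_singleton, htok, List.modifyHead_cons, List.flatMap_cons, if_neg,
            not_false_iff] at ih ⊢
          rw [ih]
          cases htok2 : pvTok S a with
          | nil => exact absurd htok2 (pvTok_ne_nil S a)
          | cons b u =>
            simp [pvTok, hdS, htok2]

theorem pvStrip_cons_ws (w : Char) (t : List Char) (hw : PySem.Chars.isspace w = true) :
    PySem.Chars.strip (w :: t) = PySem.Chars.strip t := by
  simp [PySem.Chars.strip, PySem.Chars.lstrip, List.dropWhile_cons, hw]

theorem pvRstrip_append_ws (w : Char) (t : List Char) (hw : PySem.Chars.isspace w = true) :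
    PySem.Chars.rstrip (t ++ [w]) = PySem.Chars.rstrip t := by
  simp [PySem.Chars.rstrip, List.dropWhile_cons, hw]

theorem pvStrip_append_ws (w : Char) (t : List Char) (hw : PySem.Chars.isspace w = true) :
    PySem.Chars.strip (t ++ [w]) = PySem.Chars.strip t := by
  by_cases hall : ∀ x ∈ t, PySem.Chars.isspace x = true
  · have h1 : PySem.Chars.lstrip (t ++ [w]) = [] := by
      simp [PySem.Chars.lstrip, List.dropWhile_append, hw]
      exact hall
    have h2 : PySem.Chars.lstrip t = [] := by
      simp only [PySem.Chars.lstrip, List.dropWhile_eq_nil_iff]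
      intro x hx
      exact hall x hx
    rw [PySem.Chars.strip, PySem.Chars.strip, h1, h2]
  · have h1 : PySem.Chars.lstrip (t ++ [w]) = PySem.Chars.lstrip t ++ [w] := by
      push_neg at hall
      simp only [PySem.Chars.lstrip, List.dropWhile_append]
      rw [if_neg]
      simp only [List.isEmpty_iff, List.dropWhile_eq_nil_iff]
      push_neg
      obtain ⟨x, hx, hxs⟩ := hall
      exact ⟨x, hx, by simp [hxs]⟩
    rw [PySem.Chars.strip, h1, pvRstrip_append_ws _ _ hw, PySem.Chars.strip]

theorem pvRstrip_pre (x : List Char) : PySem.Chars.rstrip x <+: x := by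
  have h := List.dropWhile_suffix (l := x.reverse) (p := PySem.Chars.isspace)
  rw [PySem.Chars.rstrip]
  have h2 := (List.reverse_suffix (l₁ := (List.dropWhile PySem.Chars.isspace x.reverse).reverse)
    (l₂ := x)).1
  apply h2
  simpa using h

theorem pvLstrip_rstrip (x : List Char) (hx : PySem.Chars.lstrip x = x) :
    PySem.Chars.lstrip (PySem.Chars.rstrip x) = PySem.Chars.rstrip x := by
  cases hr : PySem.Chars.rstrip x with
  | nil => simp [PySem.Chars.lstrip]
  | cons a r =>
    have hpre := pvRstrip_pre x
    rw [hr] at hpre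
    obtain ⟨tl, htl⟩ := hpre
    have hx0 : ¬ PySem.Chars.isspace (x[0]'(by rw [← htl]; simp)) = true := by
      rw [PySem.Chars.lstrip, List.dropWhile_eq_self_iff] at hx
      exact hx (by rw [← htl]; simp)
    have ha : x[0]'(by rw [← htl]; simp) = a := by
      simp [← htl]
    rw [ha] at hx0
    simp [PySem.Chars.lstrip, List.dropWhile_cons, hx0]

theorem pvRstrip_idem (y : List Char) :
    PySem.Chars.rstrip (PySem.Chars.rstrip y) = PySem.Chars.rstrip y := by
  simp [PySem.Chars.rstrip, List.dropWhile_idempotent]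

theorem pvStrip_idem (t : List Char) :
    PySem.Chars.strip (PySem.Chars.strip t) = PySem.Chars.strip t := by
  have hl : PySem.Chars.lstrip (PySem.Chars.lstrip t) = PySem.Chars.lstrip t :=
    List.dropWhile_idempotent _ _
  rw [PySem.Chars.strip, PySem.Chars.strip, pvLstrip_rstrip _ hl, pvRstrip_idem]

def pvG (t : List Char) : Option String :=
  if PySem.Chars.strip t = [] then none
  else some (String.ofList (PySem.Chars.upper (PySem.Chars.strip t)))

def pvModLast (f : List Char → List Char) : List (List Char) → List (List Char)
  | [] => []
  | [a] => [f a]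
  | a :: b :: l => a :: pvModLast f (b :: l)

theorem pvFilterMap_modLast (g : List Char → List Char)
    (hg : ∀ t, pvG (g t) = pvG t) (L : List (List Char)) :
    (pvModLast g L).filterMap pvG = L.filterMap pvG := by
  induction L with
  | nil => rfl
  | cons a l ih =>
    cases l with
    | nil => rw [pvModLast, List.filterMap_cons, List.filterMap_cons, hg]
    | cons b m => rw [pvModLast, List.filterMap_cons, List.filterMap_cons, ih]

theorem pvTok_append (S : List Char) (v : List Char) (w : Char) :
    pvTok S (v ++ [w]) =
      if w ∈ S then pvTok S v ++ [[]] else pvModLast (· ++ [w]) (pvTok S v) := by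
  induction v with
  | nil =>
    by_cases hw : w ∈ S <;> simp [pvTok, pvModLast, hw]
  | cons c v ih =>
    by_cases hc : c ∈ S
    · by_cases hw : w ∈ S
      · simp [pvTok, hc, hw, ih]
      · cases htok : pvTok S v with
        | nil => exact absurd htok (pvTok_ne_nil S v)
        | cons a t =>
          simp only [List.cons_append, pvTok, hc, if_pos, hw, if_neg, ih, htok]
          cases t <;> simp [pvModLast]
    · by_cases hw : w ∈ S
      · cases htok : pvTok S v with
        | nil => exact absurd htok (pvTok_ne_nil S v)
        | cons a t =>
          simp [pvTok, hc, hw, ih, htok]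
      · cases htok : pvTok S v with
        | nil => exact absurd htok (pvTok_ne_nil S v)
        | cons a t =>
          simp only [List.cons_append, pvTok, hc, if_neg, hw, ih, htok]
          cases t <;> simp [pvModLast]

theorem pvRes_tok_lstrip (S : List Char) (u : List Char) :
    (pvTok S (PySem.Chars.lstrip u)).filterMap pvG = (pvTok S u).filterMap pvG := by
  induction u with
  | nil => rfl
  | cons w u ih =>
    by_cases hw : PySem.Chars.isspace w = true
    · have hl : PySem.Chars.lstrip (w :: u) = PySem.Chars.lstrip u := by
        simp [PySem.Chars.lstrip, List.dropWhile_cons, hw]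
      rw [hl, ih]
      have h0 : pvG [] = none := rfl
      by_cases hwS : w ∈ S
      · simp only [pvTok, hwS, if_pos, List.filterMap_cons, h0]
      · cases htok : pvTok S u with
        | nil => exact absurd htok (pvTok_ne_nil S u)
        | cons a t =>
          have hwa : pvG (w :: a) = pvG a := by
            simp only [pvG, pvStrip_cons_ws w a hw]
          simp only [pvTok, hwS, if_neg, htok, List.modifyHead_cons,
            List.filterMap_cons, hwa, not_false_iff]
    · have hl : PySem.Chars.lstrip (w :: u) = w :: u := by
        simp [PySem.Chars.lstrip, List.dropWhile_cons, hw]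
      rw [hl]

theorem pvRes_tok_rstrip (S : List Char) (u : List Char) :
    (pvTok S (PySem.Chars.rstrip u)).filterMap pvG = (pvTok S u).filterMap pvG := by
  induction u using List.reverseRecOn with
  | nil => rfl
  | append_singleton v w ih =>
    by_cases hw : PySem.Chars.isspace w = true
    · rw [pvRstrip_append_ws w v hw, ih, pvTok_append]
      by_cases hwS : w ∈ S
      · rw [if_pos hwS, List.filterMap_append]
        have h0 : pvG [] = none := rfl
        simp [h0]
      · rw [if_neg hwS, pvFilterMap_modLast]
        intro t
        simp only [pvG, pvStrip_append_ws w t hw]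
    · have hr : PySem.Chars.rstrip (v ++ [w]) = v ++ [w] := by
        simp [PySem.Chars.rstrip, List.dropWhile_cons, hw]
      rw [hr]

theorem pvRes_tok_strip (S : List Char) (u : List Char) :
    (pvTok S (PySem.Chars.strip u)).filterMap pvG = (pvTok S u).filterMap pvG := by
  rw [PySem.Chars.strip, pvRes_tok_rstrip, pvRes_tok_lstrip]

theorem pvTok_nil_seps (t : List Char) : pvTok [] t = [t] := by
  induction t with
  | nil => rfl
  | cons c cs ih => simp [pvTok, ih]

theorem pvFM_congr (F1 F2 : List Char → List (List Char)) (L : List (List Char))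
    (h : ∀ t ∈ L, (F1 t).filterMap pvG = (F2 t).filterMap pvG) :
    (L.flatMap F1).filterMap pvG = (L.flatMap F2).filterMap pvG := by
  induction L with
  | nil => rfl
  | cons a l ih =>
    simp only [List.flatMap_cons, List.filterMap_append]
    rw [h a (by simp), ih (fun t ht => h t (by simp [ht]))]

def pvPass (L : List (List Char)) (c : Char) : List (List Char) :=
  L.foldl
    (fun new_interfaces interface =>
      new_interfaces ++ (PySem.Chars.splitOn interface [c]).map PySem.Chars.strip)
    []

theorem pvPass_eq (L : List (List Char)) (c : Char) :
    pvPass L c = L.flatMap (fun t => (pvTok [c] t).map PySem.Chars.strip) := by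
  rw [pvPass, PySem.List.foldl_append_eq_flatMap, List.nil_append]
  congr 1
  funext t
  rw [pvSplitOn_eq_tok]

theorem pvPipe_res (S : List Char) (L : List (List Char)) :
    ((S.foldl pvPass L).filterMap pvG) = (L.flatMap (pvTok S)).filterMap pvG := by
  induction S generalizing L with
  | nil =>
    rw [List.foldl_nil, show pvTok [] = (fun t => [t]) from funext pvTok_nil_seps]
    simp
  | cons c S ih =>
    rw [List.foldl_cons, ih, pvPass_eq, List.flatMap_assoc]
    apply pvFM_congr
    intro t _
    rw [pvTok_cons c S t]
    have hmap : (List.flatMap (pvTok S) (List.map PySem.Chars.strip (pvTok [c] t)))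
        = List.flatMap (fun u => pvTok S (PySem.Chars.strip u)) (pvTok [c] t) := by
      rw [List.flatMap_map]
    rw [hmap]
    apply pvFM_congr
    intro u _
    exact pvRes_tok_strip S u

theorem pvPass_stripped (L : List (List Char)) (c : Char) :
    ∀ t ∈ pvPass L c, PySem.Chars.strip t = t := by
  intro t ht
  rw [pvPass_eq] at ht
  simp only [List.mem_flatMap, List.mem_map] at ht
  obtain ⟨u, _, v, _, rfl⟩ := ht
  exact pvStrip_idem v

theorem pvPipe_stripped (S : List Char) (c : Char) (L : List (List Char)) :
    ∀ t ∈ (c :: S).foldl pvPass L, PySem.Chars.strip t = t := by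
  induction S generalizing c L with
  | nil => exact pvPass_stripped L c
  | cons d S ih =>
    intro t ht
    exact ih d (pvPass L c) t ht

theorem pvResA_eq (L : List (List Char)) (h : ∀ t ∈ L, PySem.Chars.strip t = t) :
    (L.filter (fun i => !i.isEmpty && !(PySem.Chars.strip i).isEmpty)).map
      (fun i => String.ofList (PySem.Chars.upper i)) = L.filterMap pvG := by
  induction L with
  | nil => rfl
  | cons a l ih =>
    have ha := h a (by simp)
    have hl := ih (fun t ht => h t (by simp [ht]))
    by_cases hae : a = []
    · subst hae
      have h0 : pvG [] = none := rfl
      simp [h0, hl]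
    · have h1 : (!a.isEmpty && !(PySem.Chars.strip a).isEmpty) = true := by
        simp [List.isEmpty_iff, hae, ha]
      have h2 : pvG a = some (String.ofList (PySem.Chars.upper a)) := by
        simp [pvG, ha, hae]
      simp only [List.filter_cons, h1, if_true, List.map_cons, List.filterMap_cons, h2, hl]

theorem pvB_spec (cs : List Char) (out : List String) (cur : List Char) :
    ((cs ++ [',']).foldl pvStepB (out, cur)).1 =
      out ++ ((pvTok pvSeps cs).modifyHead (cur ++ ·)).filterMap pvG := by
  induction cs generalizing out cur with
  | nil =>
    have hc : (',' : Char) ∈ pvSeps := by simp [pvSeps]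
    simp only [List.nil_append, List.foldl_cons, List.foldl_nil, pvStepB, hc, if_pos, pvTok,
      List.modifyHead_cons, List.append_nil, List.filterMap_cons, List.filterMap_nil, pvG]
    by_cases h : PySem.Chars.strip cur = [] <;> simp [h]
  | cons c cs ih =>
    by_cases hc : c ∈ pvSeps
    · simp only [List.cons_append, List.foldl_cons, pvStepB, hc, if_pos]
      rw [ih]
      simp only [pvTok, hc, if_pos, List.modifyHead_cons, List.filterMap_cons]
      cases htok : pvTok pvSeps cs with
      | nil => exact absurd htok (pvTok_ne_nil pvSeps cs)
      | cons a t =>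
        simp only [htok, List.modifyHead_cons, pvG]
        by_cases h : PySem.Chars.strip cur = [] <;> simp [h]
    · simp only [List.cons_append, List.foldl_cons, pvStepB, hc, if_neg, not_false_iff]
      rw [ih]
      simp only [pvTok, hc, if_neg, not_false_iff]
      cases htok : pvTok pvSeps cs with
      | nil => exact absurd htok (pvTok_ne_nil pvSeps cs)
      | cons a t =>
        simp [htok, List.append_assoc]

theorem pvA_char (s : List Char) :
    (((pvSeps.foldl pvPass [s]).filter
        (fun i => !i.isEmpty && !(PySem.Chars.strip i).isEmpty)).map
      (fun i => String.ofList (PySem.Chars.upper i))) = (pvTok pvSeps s).filterMap pvG := by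
  simp only [pvSeps]
  rw [pvResA_eq _ (pvPipe_stripped [';', '|', '\n'] ',' [s]), pvPipe_res]
  simp

-- ===== VERDICT (by name: the statement is the Claim_ definition above) =====
theorem parse_interfaces_py_spec : Claim_equal_parse_interfaces_py := by
  intro s _
  unfold Spec_parse_interfaces_py parse_interfaces_py parse_interfaces_py_alt
  rw [pvB_spec, List.nil_append]
  have hid : List.modifyHead (fun x => ([] : List Char) ++ x) (pvTok pvSeps s.toList)
      = pvTok pvSeps s.toList := by
    cases htok : pvTok pvSeps s.toList with
    | nil => rfl
    | cons a t => simp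
  rw [hid]
  by_cases h : s.toList = []
  · rw [if_pos h, h]
    rfl
  · rw [if_neg h]
    exact pvA_char s.toList
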